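-- pv_equiv track=rewrite | github.com/GarretShadow/invest | invest/core.py | generate_projects_times
-- ===== SOURCE A (Python) =====
-- import itertools
--
-- def generate_projects_times(projects_times, time):
--     """
--     >>> list(Invest.generate_projects_times([-1, 0, 2, -1, -1], 0))
--     [[-1, 0, 2, -1, -1], [-1, 0, 2, -1, 0], [-1, 0, 2, 0, -1], [-1, 0, 2, 0, 0], [0, 0, 2, -1, -1], [0, 0, 2, -1, 0], [0, 0, 2, 0, -1], [0, 0, 2, 0, 0]]
--     """
--     count = projects_times.count(-1)
--     for i in itertools.product([-1, time], repeat=count):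
--         v = list(i)
--         result = []
--         for j in projects_times:
--             if j != -1:
--                 result.append(j)
--             else:
--                 result.append(v.pop(0))
--         yield result
-- ===== SOURCE B (Python) =====
-- def generate_projects_times(projects_times, time):
--     # Build, right to left, all completed suffixes as shared linked cons-cells
--     # (tail-sharing keeps this O(n * 2^count) like A, with no recursion).
--     suffixes = [None]
--     for j in reversed(projects_times):
--         if j != -1:
--             suffixes = [(j, s) for s in suffixes]
--         else:
--             suffixes = [(-1, s) for s in suffixes] + [(time, s) for s in suffixes]
--     for s in suffixes:
--         out = []
--         while s is not None:
--             out.append(s[0])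
--             s = s[1]
--         yield out
-- ===== Notes on version B (the rewrite author's own statement) =====
-- stated objective: alternative
-- what changed: Replaces itertools.product over the -1 count plus a pop(0) fill pass with direct structural recursion on the list, branching -1-then-time at each -1 slot.
import Mathlib
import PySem

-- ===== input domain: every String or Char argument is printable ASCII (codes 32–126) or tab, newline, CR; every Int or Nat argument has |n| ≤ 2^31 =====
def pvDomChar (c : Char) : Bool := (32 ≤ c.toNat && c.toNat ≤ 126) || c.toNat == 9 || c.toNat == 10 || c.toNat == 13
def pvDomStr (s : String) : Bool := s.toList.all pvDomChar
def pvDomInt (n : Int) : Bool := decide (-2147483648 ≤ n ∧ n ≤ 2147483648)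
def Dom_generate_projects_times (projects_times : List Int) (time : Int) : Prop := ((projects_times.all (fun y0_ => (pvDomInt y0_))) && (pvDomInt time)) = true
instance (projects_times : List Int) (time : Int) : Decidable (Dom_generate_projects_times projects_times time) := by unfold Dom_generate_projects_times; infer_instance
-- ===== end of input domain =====

-- B replaces itertools.product + a pop(0) fill pass with structural recursion on the list (alternative decomposition, same cost).
-- Both versions are generators in Python; the List (List Int) is the yielded sequence in order.

-- ===== PORT A =====
-- itertools.product([-1, time], repeat=n): leftmost coordinate varies slowest
def gptProd (time : Int) : Nat → List (List Int)
  | 0 => [[]]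
  | n + 1 => ([-1, time] : List Int).flatMap (fun x => (gptProd time n).map (fun r => x :: r))

-- the inner loop: result/v state, v.pop(0) at each -1 (v is never empty when popped
-- since len(v) = count of -1; head/tail with default 0 is exact on reachable states)
def gptFill (projects_times : List Int) (v : List Int) : List Int :=
  (projects_times.foldl
    (fun (st : List Int × List Int) j =>
      if j ≠ -1 then (st.1 ++ [j], st.2)
      else (st.1 ++ [st.2.headD 0], st.2.tail)) ([], v)).1

def generate_projects_times (projects_times : List Int) (time : Int) : List (List Int) :=
  (gptProd time (projects_times.count (-1))).map (fun i => gptFill projects_times i)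

-- ===== PORT B =====
-- Source B's loop over reversed(projects_times) is this foldr; its cons-cells (j, s)
-- are Lean's j :: s, and its final cell-to-list conversion loop is the identity on List Int.
def generate_projects_times_alt (projects_times : List Int) (time : Int) : List (List Int) :=
  (projects_times.foldr
    (fun j suffixes =>
      if j ≠ -1 then suffixes.map (fun s => j :: s)
      else (suffixes.map (fun s => (-1 : Int) :: s)) ++ (suffixes.map (fun s => time :: s)))
    [[]]).map (fun s => s)

-- ===== PRECONDITION & SPEC =====
def Spec_generate_projects_times (projects_times : List Int) (time : Int) (out : List (List Int)) : Prop := out = generate_projects_times_alt projects_times time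
instance (projects_times : List Int) (time : Int) (out : List (List Int)) : Decidable (Spec_generate_projects_times projects_times time out) := by unfold Spec_generate_projects_times; infer_instance

-- ===== CLAIM (what is proved, stated in full; the proofs are below) =====
def Claim_equal_generate_projects_times : Prop := ∀ (projects_times : List Int) (time : Int), Dom_generate_projects_times projects_times time → Spec_generate_projects_times projects_times time (generate_projects_times projects_times time)

-- ===== LEMMAS AND PROOFS =====

-- B's foldr, written as structural recursion
def gptGo (time : Int) : List Int → List (List Int)
  | [] => [[]]
  | j :: tail =>
    if j ≠ -1 then (gptGo time tail).map (fun s => j :: s)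
    else ((gptGo time tail).map (fun s => (-1 : Int) :: s)) ++ ((gptGo time tail).map (fun s => time :: s))

theorem alt_eq_gptGo (pts : List Int) (time : Int) :
    generate_projects_times_alt pts time = gptGo time pts := by
  unfold generate_projects_times_alt
  rw [List.map_id']
  induction pts with
  | nil => rfl
  | cons j tail ih => rw [List.foldr_cons, ih]; rfl

-- structural characterisation of the fold in gptFill
def gptFillRec : List Int → List Int → List Int
  | [], _ => []
  | j :: tail, v =>
    if j ≠ -1 then j :: gptFillRec tail v
    else v.headD 0 :: gptFillRec tail v.tail

theorem gptFill_foldl (pts : List Int) : ∀ (acc v : List Int),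
    (pts.foldl
      (fun (st : List Int × List Int) j =>
        if j ≠ -1 then (st.1 ++ [j], st.2)
        else (st.1 ++ [st.2.headD 0], st.2.tail)) (acc, v)).1 = acc ++ gptFillRec pts v := by
  induction pts with
  | nil => intro acc v; simp [gptFillRec]
  | cons j tail ih =>
    intro acc v
    rw [List.foldl_cons]
    by_cases h : j = -1
    · rw [if_neg (by simp [h]), ih]
      simp [gptFillRec, h]
    · rw [if_pos h, ih]
      simp [gptFillRec, h]

theorem gptFill_eq (pts v : List Int) : gptFill pts v = gptFillRec pts v := by
  unfold gptFill
  rw [gptFill_foldl]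
  simp

theorem gptGo_eq (time : Int) (pts : List Int) :
    gptGo time pts = (gptProd time (pts.count (-1))).map (fun i => gptFillRec pts i) := by
  induction pts with
  | nil => simp [gptGo, gptProd, gptFillRec]
  | cons j tail ih =>
    by_cases h : j = -1
    · subst h
      rw [show gptGo time (-1 :: tail)
            = ((gptGo time tail).map (fun s => (-1 : Int) :: s))
              ++ ((gptGo time tail).map (fun s => time :: s)) by
          rw [gptGo, if_neg (by simp)]]
      rw [List.count_cons_self]
      rw [show gptProd time (tail.count (-1) + 1)
            = ((gptProd time (tail.count (-1))).map (fun r => (-1 : Int) :: r))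
              ++ ((gptProd time (tail.count (-1))).map (fun r => time :: r)) by
          rw [gptProd]; simp [List.flatMap_cons]]
      rw [List.map_append, List.map_map, List.map_map, ih, List.map_map, List.map_map]
      congr 1 <;>
        (apply List.map_congr_left; intro v _; simp [Function.comp, gptFillRec])
    · rw [show gptGo time (j :: tail) = (gptGo time tail).map (fun s => j :: s) by
          rw [gptGo, if_pos h]]
      rw [List.count_cons_of_ne h, ih, List.map_map]
      apply List.map_congr_left
      intro v _
      simp [gptFillRec, h]

-- ===== VERDICT (by name: the statement is the Claim_ definition above) =====
theorem generate_projects_times_spec : Claim_equal_generate_projects_times := by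
  intro pts time _
  show generate_projects_times pts time = generate_projects_times_alt pts time
  rw [alt_eq_gptGo, gptGo_eq]
  simp [generate_projects_times, gptFill_eq]
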